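-- pv_equiv track=rewrite | github.com/ZhaoXianglin/phonebot_backend | utils/function/system_critiquing.py | obtain_critique_items_dict
-- ===== SOURCE A (Python) =====
-- import copy
--
-- def obtain_critique_items_dict(frequent_critiques_freq_dict, item_critique_arrays_dict):
--     frequent_critiques_satisfied_items_dict = {}
--     for crit in frequent_critiques_freq_dict:
--         crit_list = list(crit)
--         crit_item_list = []
--         for item_id, item_critique_array in item_critique_arrays_dict.items():
--             satisfy_or_not = all(unit in item_critique_array for unit in crit_list)
--             if satisfy_or_not:
--                 crit_item_list.append(item_id)
--         frequent_critiques_satisfied_items_dict[crit] = copy.deepcopy(crit_item_list)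
--     return frequent_critiques_satisfied_items_dict
-- ===== SOURCE B (Python) =====
-- import copy
--
-- def obtain_critique_items_dict(frequent_critiques_freq_dict, item_critique_arrays_dict):
--     # Build an inverted index: unit -> set of item ids whose array contains it.
--     index = {}
--     for item_id, item_critique_array in item_critique_arrays_dict.items():
--         for unit in item_critique_array:
--             index.setdefault(unit, set()).add(item_id)
--     all_ids = list(item_critique_arrays_dict.keys())
--     result = {}
--     for crit in frequent_critiques_freq_dict:
--         units = list(crit)
--         if not units:
--             ids = list(all_ids)
--         else:
--             inter = set(all_ids)
--             for u in units:
--                 inter &= index.get(u, set())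
--             ids = [i for i in all_ids if i in inter]
--         result[crit] = copy.deepcopy(ids)
--     return result
-- ===== Notes on version B (the rewrite author's own statement) =====
-- stated objective: alternative
-- what changed: B builds an inverted index (unit -> set of item ids) in one pass over the items and answers each critique by intersecting the index sets of its units (iterating the items dict order to keep list order), instead of rescanning every item's whole array for every critique.
import Mathlib
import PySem

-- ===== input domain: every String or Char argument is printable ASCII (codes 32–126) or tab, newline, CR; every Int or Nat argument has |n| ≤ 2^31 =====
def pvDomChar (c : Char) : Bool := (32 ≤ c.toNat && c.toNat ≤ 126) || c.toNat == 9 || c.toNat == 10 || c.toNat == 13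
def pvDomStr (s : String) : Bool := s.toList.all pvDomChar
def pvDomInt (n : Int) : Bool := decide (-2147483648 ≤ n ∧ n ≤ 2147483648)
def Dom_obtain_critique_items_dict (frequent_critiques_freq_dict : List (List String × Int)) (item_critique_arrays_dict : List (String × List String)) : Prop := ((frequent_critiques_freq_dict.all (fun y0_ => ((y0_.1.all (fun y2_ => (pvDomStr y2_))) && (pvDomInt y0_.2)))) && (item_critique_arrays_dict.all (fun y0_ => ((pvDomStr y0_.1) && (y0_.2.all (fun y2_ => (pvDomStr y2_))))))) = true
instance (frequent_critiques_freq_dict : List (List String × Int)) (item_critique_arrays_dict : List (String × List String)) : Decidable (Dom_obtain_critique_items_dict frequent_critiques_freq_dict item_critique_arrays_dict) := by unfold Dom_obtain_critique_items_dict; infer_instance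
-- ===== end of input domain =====

-- B builds an inverted index (unit -> set of item ids) once and answers each critique by
-- set intersection instead of rescanning every item's array per critique (objective: alternative).

-- ===== PORT A =====
def obtain_critique_items_dict (frequent_critiques_freq_dict : List (List String × Int)) (item_critique_arrays_dict : List (String × List String)) : List (List String × List String) :=
  let fdd := PySem.Dict.ofList frequent_critiques_freq_dict
  let itd := PySem.Dict.ofList item_critique_arrays_dict
  -- 'for crit in frequent_critiques_freq_dict' iterates the dict's keys
  (fdd.keys.foldl (fun res crit =>
      let crit_list := crit
      let crit_item_list := itd.items.foldl (fun cl it =>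
          if crit_list.all (fun unit => it.2.contains unit) then cl ++ [it.1] else cl) []
      res.insert crit crit_item_list) PySem.Dict.empty).items

-- ===== PORT B =====
-- helper of B: the inverted index built once over the items
def pvIndex (items : List (String × List String)) : PySem.Dict String (PySem.Set String) :=
  items.foldl (fun idx it =>
    it.2.foldl (fun idx2 unit =>
      idx2.insert unit (PySem.Set.add (idx2.getD unit PySem.Set.empty) it.1)) idx) PySem.Dict.empty

def obtain_critique_items_dict_alt (frequent_critiques_freq_dict : List (List String × Int)) (item_critique_arrays_dict : List (String × List String)) : List (List String × List String) :=
  let itd := PySem.Dict.ofList item_critique_arrays_dict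
  let index := pvIndex itd.items
  let all_ids := itd.keys
  ((PySem.Dict.ofList frequent_critiques_freq_dict).keys.foldl (fun res crit =>
      let ids :=
        if crit.isEmpty then all_ids
        else
          let inter := crit.foldl (fun s unit => PySem.Set.inter s (index.getD unit PySem.Set.empty)) (PySem.Set.ofList all_ids)
          all_ids.filter (fun i => PySem.Set.contains inter i)
      res.insert crit ids) PySem.Dict.empty).items

-- ===== PRECONDITION & SPEC =====
def Spec_obtain_critique_items_dict (frequent_critiques_freq_dict : List (List String × Int)) (item_critique_arrays_dict : List (String × List String)) (out : List (List String × List String)) : Prop := out = obtain_critique_items_dict_alt frequent_critiques_freq_dict item_critique_arrays_dict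
instance (frequent_critiques_freq_dict : List (List String × Int)) (item_critique_arrays_dict : List (String × List String)) (out : List (List String × List String)) : Decidable (Spec_obtain_critique_items_dict frequent_critiques_freq_dict item_critique_arrays_dict out) := by unfold Spec_obtain_critique_items_dict; infer_instance

-- ===== CLAIM (what is proved, stated in full; the proofs are below) =====
def Claim_equal_obtain_critique_items_dict : Prop := ∀ (frequent_critiques_freq_dict : List (List String × Int)) (item_critique_arrays_dict : List (String × List String)), Dom_obtain_critique_items_dict frequent_critiques_freq_dict item_critique_arrays_dict → Spec_obtain_critique_items_dict frequent_critiques_freq_dict item_critique_arrays_dict (obtain_critique_items_dict frequent_critiques_freq_dict item_critique_arrays_dict)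

-- ===== LEMMAS AND PROOFS =====

-- membership in the per-item inner fold of the index
theorem pv_mem_inner (id : String) (arr : List String) :
    ∀ (idx : PySem.Dict String (PySem.Set String)) (u x : String),
    (x ∈ (arr.foldl (fun idx2 unit => idx2.insert unit (PySem.Set.add (idx2.getD unit PySem.Set.empty) id)) idx).getD u PySem.Set.empty
      ↔ x ∈ idx.getD u PySem.Set.empty ∨ (x = id ∧ u ∈ arr)) := by
  induction arr with
  | nil => intro idx u x; simp
  | cons a arr ih =>
    intro idx u x
    simp only [List.foldl_cons]
    rw [ih]
    rw [PySem.Dict.getD_insert]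
    by_cases h : u = a
    · subst h
      simp [PySem.Set.mem_add]
      tauto
    · simp [h]

-- membership in the inverted index
theorem pv_mem_index (L : List (String × List String)) :
    ∀ (idx : PySem.Dict String (PySem.Set String)) (u x : String),
    (x ∈ (L.foldl (fun idx it =>
        it.2.foldl (fun idx2 unit => idx2.insert unit (PySem.Set.add (idx2.getD unit PySem.Set.empty) it.1)) idx) idx).getD u PySem.Set.empty
      ↔ x ∈ idx.getD u PySem.Set.empty ∨ ∃ p ∈ L, p.1 = x ∧ u ∈ p.2) := by
  induction L with
  | nil => intro idx u x; simp
  | cons a L ih =>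
    intro idx u x
    simp only [List.foldl_cons]
    rw [ih, pv_mem_inner]
    simp only [List.mem_cons]
    constructor
    · rintro ((h | ⟨rfl, hu⟩) | ⟨p, hp, rfl, hu⟩)
      · exact Or.inl h
      · exact Or.inr ⟨a, Or.inl rfl, rfl, hu⟩
      · exact Or.inr ⟨p, Or.inr hp, rfl, hu⟩
    · rintro (h | ⟨p, (rfl | hp), rfl, hu⟩)
      · exact Or.inl (Or.inl h)
      · exact Or.inl (Or.inr ⟨rfl, hu⟩)
      · exact Or.inr ⟨p, hp, rfl, hu⟩

theorem pv_mem_index' (L : List (String × List String)) (u x : String) :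
    (x ∈ (pvIndex L).getD u PySem.Set.empty ↔ ∃ p ∈ L, p.1 = x ∧ u ∈ p.2) := by
  unfold pvIndex
  rw [pv_mem_index]
  simp [PySem.Dict.getD_empty, PySem.Set.empty]

-- membership in the intersection fold
theorem pv_mem_interfold (index : PySem.Dict String (PySem.Set String)) (crit : List String) :
    ∀ (s : List String) (x : String),
    (x ∈ crit.foldl (fun s unit => PySem.Set.inter s (index.getD unit PySem.Set.empty)) s
      ↔ x ∈ s ∧ ∀ u ∈ crit, x ∈ index.getD u PySem.Set.empty) := by
  induction crit with
  | nil => intro s x; simp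
  | cons c crit ih =>
    intro s x
    simp only [List.foldl_cons]
    rw [ih]
    rw [PySem.Set.mem_inter]
    simp only [List.mem_cons]
    constructor
    · rintro ⟨⟨hs, hc⟩, hall⟩
      exact ⟨hs, fun u hu => hu.elim (fun h => h ▸ hc) (hall u)⟩
    · rintro ⟨hs, hall⟩
      exact ⟨⟨hs, hall c (Or.inl rfl)⟩, fun u hu => hall u (Or.inr hu)⟩

-- unique keys: an entry is determined by its key
theorem pv_key_inj (L : List (String × List String)) (h : (L.map Prod.fst).Nodup) :
    ∀ p ∈ L, ∀ q ∈ L, p.1 = q.1 → p = q := by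
  induction L with
  | nil => intro p hp; simp at hp
  | cons a L ih =>
    simp only [List.map_cons, List.nodup_cons] at h
    intro p hp q hq hpq
    rcases List.mem_cons.mp hp with hp | hp <;> rcases List.mem_cons.mp hq with hq | hq
    · rw [hp, hq]
    · rw [hp] at hpq ⊢; exact absurd (hpq ▸ List.mem_map_of_mem hq) h.1
    · rw [hq] at hpq ⊢; have : (p.1 : String) ∈ List.map Prod.fst L := List.mem_map_of_mem hp
      rw [hpq] at this
      exact absurd this h.1
    · exact ih h.2 p hp q hq hpq

-- filter on keys = keys of the filtered pairs, given a pointwise agreement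
theorem pv_filter_map_fst (L : List (String × List String)) (q : String → Bool)
    (p : String × List String → Bool) (h : ∀ it ∈ L, q it.1 = p it) :
    (L.map Prod.fst).filter q = (L.filter p).map Prod.fst := by
  induction L with
  | nil => rfl
  | cons a L ih =>
    simp only [List.map_cons, List.filter_cons, h a (List.mem_cons_self ..)]
    by_cases hp : p a
    · simp only [hp, if_true]
      simp only [List.map_cons]
      rw [ih (fun it hit => h it (List.mem_cons_of_mem _ hit))]
    · simp only [hp]
      simp only [Bool.false_eq_true, if_false]
      exact ih (fun it hit => h it (List.mem_cons_of_mem _ hit))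

-- the per-critique value computed by A equals the one computed by B
theorem pv_value_eq (items0 : List (String × List String)) (crit : List String) :
    ((PySem.Dict.ofList items0).items.foldl (fun cl it =>
        if crit.all (fun unit => it.2.contains unit) then cl ++ [it.1] else cl) [])
    = (if crit.isEmpty then (PySem.Dict.ofList items0).keys
       else (PySem.Dict.ofList items0).keys.filter (fun i =>
         PySem.Set.contains (crit.foldl (fun s unit =>
             PySem.Set.inter s ((pvIndex (PySem.Dict.ofList items0).items).getD unit PySem.Set.empty))
           (PySem.Set.ofList (PySem.Dict.ofList items0).keys)) i)) := by
  set L := (PySem.Dict.ofList items0).items with hL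
  have hnd : (L.map Prod.fst).Nodup := PySem.Dict.nodup_keys_ofList items0
  have hkeys : (PySem.Dict.ofList items0).keys = L.map Prod.fst := rfl
  rw [PySem.List.foldl_append_if, hkeys]
  simp only [List.nil_append]
  by_cases hc : crit.isEmpty
  · rw [List.isEmpty_iff] at hc
    subst hc
    simp
  · simp only [hc, Bool.false_eq_true, if_false]
    have hpt : ∀ it ∈ L,
        (PySem.Set.contains (crit.foldl (fun s unit =>
             PySem.Set.inter s ((pvIndex L).getD unit PySem.Set.empty))
           (PySem.Set.ofList (L.map Prod.fst))) it.1)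
        = crit.all (fun unit => it.2.contains unit) := by
      intro it hit
      rw [Bool.eq_iff_iff]
      simp only [PySem.Set.contains_eq_listContains, List.contains_iff_mem]
      rw [pv_mem_interfold]
      simp only [PySem.Set.mem_ofList]
      constructor
      · rintro ⟨-, hall⟩
        simp only [List.all_eq_true, List.contains_iff_mem]
        intro u hu
        obtain ⟨p, hp, hpk, hum⟩ := (pv_mem_index' L u it.1).mp (hall u hu)
        exact (pv_key_inj L hnd p hp it hit hpk) ▸ hum
      · intro hall
        simp only [List.all_eq_true, List.contains_iff_mem] at hall
        refine ⟨List.mem_map_of_mem hit, fun u hu => ?_⟩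
        exact (pv_mem_index' L u it.1).mpr ⟨it, hit, rfl, hall u hu⟩
    exact (pv_filter_map_fst L _ _ hpt).symm

-- ===== VERDICT (by name: the statement is the Claim_ definition above) =====
theorem obtain_critique_items_dict_spec : Claim_equal_obtain_critique_items_dict := by
  intro fd items0 _
  show obtain_critique_items_dict fd items0 = obtain_critique_items_dict_alt fd items0
  simp only [obtain_critique_items_dict, obtain_critique_items_dict_alt]
  refine congrArg PySem.Dict.items ?_
  apply PySem.List.foldl_congr_mem
  intro acc crit _
  rw [pv_value_eq items0 crit]
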